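-- pv_equiv track=rewrite | github.com/tabenmalik/Project-Euler | project_euler/misc.py | even_fibonacci_seq
-- ===== SOURCE A (Python) =====
-- def even_fibonacci_seq(under=None):
--     """
--     A generator of even fibonacci numbers
--     """
--     fib_1 = 2
--     fib_2 = 8
--
--     if under is None or fib_1 < under:
--         yield fib_1
--
--     if under is None or fib_2 < under:
--         yield fib_2
--
--     fib_new = 4*fib_2 + fib_1
--     while under is None or fib_new < under:
--         yield fib_new
--
--         fib_1 = fib_2
--         fib_2 = fib_new
--
--         fib_new = 4*fib_2 + fib_1
-- ===== SOURCE B (Python) =====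
-- def even_fibonacci_seq(under=None):
--     """
--     A generator of even fibonacci numbers
--     """
--     a, b = 1, 1
--     while True:
--         a, b = b, a + b
--         if b % 2 == 0:
--             if under is not None and b >= under:
--                 return
--             yield b
-- ===== Notes on version B (the rewrite author's own statement) =====
-- stated objective: alternative
-- what changed: B generates the full Fibonacci sequence with the plain (a, b) -> (b, a+b) recurrence and filters for even terms, stopping at the first even term >= under, instead of A's even-only recurrence E(n+1) = 4*E(n) + E(n-1) with two unrolled initial yields; Pre_ excludes under=None, where both generators are infinite and never return a finite sequence.
import Mathlib
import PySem

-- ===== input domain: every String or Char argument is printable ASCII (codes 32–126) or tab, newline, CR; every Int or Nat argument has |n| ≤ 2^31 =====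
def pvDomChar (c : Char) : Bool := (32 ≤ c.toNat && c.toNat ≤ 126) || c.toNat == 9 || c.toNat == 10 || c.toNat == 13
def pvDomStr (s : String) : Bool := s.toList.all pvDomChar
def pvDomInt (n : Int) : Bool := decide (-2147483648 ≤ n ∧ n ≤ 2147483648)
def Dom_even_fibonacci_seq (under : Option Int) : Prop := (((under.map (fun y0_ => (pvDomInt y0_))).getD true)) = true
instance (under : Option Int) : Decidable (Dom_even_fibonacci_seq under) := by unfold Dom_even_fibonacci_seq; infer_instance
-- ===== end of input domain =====

-- B replaces A's even-only 4*E(n)+E(n-1) recurrence by the plain Fibonacci recurrence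
-- with a parity filter (objective: alternative). Both are generators; equivalence is
-- about the finite list of yielded values, so Pre_ requires a bound (under ≠ None),
-- since with under = None both generators are infinite and neither returns.


-- ===== PORT A =====
-- A's while-loop: state (fib_1, fib_2), emits fib_new = 4*fib_2 + fib_1 while < u.
-- The positivity hypotheses are invariants of A's loop, carried only for termination.
theorem aLoop_pos (fib1 fib2 : Int) (h1 : 0 ≤ fib1) (h2 : 0 < fib2) : 0 < 4 * fib2 + fib1 :=
  add_pos_of_pos_of_nonneg (mul_pos (by norm_num) h2) h1

theorem aLoop_dec (u fib1 fib2 : Int) (h1 : 0 ≤ fib1) (h2 : 0 < fib2)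
    (h : 4 * fib2 + fib1 < u) :
    (u - (4 * (4 * fib2 + fib1) + fib2)).toNat < (u - (4 * fib2 + fib1)).toNat := by
  have hx : 0 < 4 * fib2 + fib1 := aLoop_pos fib1 fib2 h1 h2
  have hstep : 4 * fib2 + fib1 < 4 * (4 * fib2 + fib1) + fib2 :=
    calc 4 * fib2 + fib1
        < (4 * fib2 + fib1) + (3 * (4 * fib2 + fib1) + fib2) :=
          lt_add_of_pos_right _ (add_pos (mul_pos (by norm_num) hx) h2)
      _ = 4 * (4 * fib2 + fib1) + fib2 := by ring
  exact (Int.toNat_lt_toNat (sub_pos.mpr h)).mpr (sub_lt_sub_left hstep u)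

def aLoop (u fib1 fib2 : Int) (h1 : 0 ≤ fib1) (h2 : 0 < fib2) : List Int :=
  if h : 4 * fib2 + fib1 < u then
    (4 * fib2 + fib1) :: aLoop u fib2 (4 * fib2 + fib1) h2.le (aLoop_pos fib1 fib2 h1 h2)
  else []
termination_by (u - (4 * fib2 + fib1)).toNat
decreasing_by exact aLoop_dec u fib1 fib2 h1 h2 h

-- For under = none A is an infinite generator (never returns); that input is excluded
-- by Pre_, and the port returns [] there.
def even_fibonacci_seq (under : Option Int) : List Int :=
  match under with
  | none => []
  | some u =>
      (if 2 < u then [2] else []) ++ (if 8 < u then [8] else []) ++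
        aLoop u 2 8 (by norm_num) (by norm_num)

-- ===== PORT B =====
-- B's while-loop: state (a, b), step (a, b) := (b, a + b); when the new b is even,
-- stop if b ≥ u, else yield b. Hypotheses are invariants, carried for termination.
theorem bLoop_dec_even (u a b : Int) (ha : 0 < a) (hab : a ≤ b) (hpar : (a + b) % 2 = 0)
    (hstop : ¬ u ≤ a + b) :
    (3 * (u - (b + (a + b))).toNat + if (b + (a + b)) % 2 = 0 then 0 else if (a + b) % 2 = 0 then 2 else 1) <
    3 * (u - (a + b)).toNat + if (a + b) % 2 = 0 then 0 else if b % 2 = 0 then 2 else 1 := by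
  have hb0 : 0 < b := lt_of_lt_of_le ha hab
  rw [if_pos hpar, if_pos hpar]
  have hx : (u - (b + (a + b))).toNat < (u - (a + b)).toNat :=
    (Int.toNat_lt_toNat (sub_pos.mpr (not_le.mp hstop))).mpr
      (sub_lt_sub_left (lt_add_of_pos_left (a + b) hb0) u)
  have hpadN : (if (b + (a + b)) % 2 = 0 then (0 : Nat) else 2) ≤ 2 := by
    split_ifs <;> norm_num
  calc 3 * (u - (b + (a + b))).toNat + (if (b + (a + b)) % 2 = 0 then (0 : Nat) else 2)
      ≤ 3 * (u - (b + (a + b))).toNat + 2 := Nat.add_le_add_left hpadN _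
    _ < 3 * (u - (a + b)).toNat + 0 := by
        have h3 : 3 * (u - (b + (a + b))).toNat + 3 ≤ 3 * (u - (a + b)).toNat := by
          simpa [Nat.mul_succ] using Nat.mul_le_mul_left 3 (Nat.succ_le_of_lt hx)
        simpa using Nat.lt_of_lt_of_le (Nat.lt_succ_self _) h3

theorem bLoop_dec_odd (u a b : Int) (ha : 0 < a) (hab : a ≤ b) (hpar : ¬ (a + b) % 2 = 0) :
    (3 * (u - (b + (a + b))).toNat + if (b + (a + b)) % 2 = 0 then 0 else if (a + b) % 2 = 0 then 2 else 1) <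
    3 * (u - (a + b)).toNat + if (a + b) % 2 = 0 then 0 else if b % 2 = 0 then 2 else 1 := by
  have hb0 : 0 < b := lt_of_lt_of_le ha hab
  have hmono : (u - (b + (a + b))).toNat ≤ (u - (a + b)).toNat :=
    Int.toNat_le_toNat (sub_le_sub_left (le_add_of_nonneg_left hb0.le) u)
  rw [if_neg hpar]
  by_cases hb : b % 2 = 0
  · have hno : ¬ (b + (a + b)) % 2 = 0 := by
      intro h
      apply hpar
      rwa [Int.add_emod, hb, zero_add, Int.emod_emod_of_dvd _ (dvd_refl 2)] at h
    rw [if_pos hb, if_neg hno, if_neg hpar]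
    exact add_lt_add_of_le_of_lt (Nat.mul_le_mul_left 3 hmono) one_lt_two
  · have hb1 : b % 2 = 1 := (Int.emod_two_eq b).resolve_left hb
    have ha1 : (a + b) % 2 = 1 := (Int.emod_two_eq (a + b)).resolve_left hpar
    have hyes : (b + (a + b)) % 2 = 0 := by
      rw [Int.add_emod, hb1, ha1]
      norm_num
    rw [if_neg hb, if_pos hyes, if_neg hpar]
    exact add_lt_add_of_le_of_lt (Nat.mul_le_mul_left 3 hmono) zero_lt_one

def bLoop (u a b : Int) (ha : 0 < a) (hab : a ≤ b) : List Int :=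
  if hpar : (a + b) % 2 = 0 then
    if hstop : u ≤ a + b then []
    else (a + b) :: bLoop u b (a + b) (lt_of_lt_of_le ha hab) (le_add_of_nonneg_left ha.le)
  else bLoop u b (a + b) (lt_of_lt_of_le ha hab) (le_add_of_nonneg_left ha.le)
termination_by 3 * (u - (a + b)).toNat +
  (if (a + b) % 2 = 0 then 0 else if b % 2 = 0 then 2 else 1)
decreasing_by
  · exact bLoop_dec_even u a b ha hab hpar hstop
  · exact bLoop_dec_odd u a b ha hab hpar

def even_fibonacci_seq_alt (under : Option Int) : List Int :=
  match under with
  | none => []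
  | some u => bLoop u 1 1 one_pos le_rfl

-- ===== PRECONDITION & SPEC =====
-- With under = None the Python A (a generator) never terminates, so it yields no
-- finite list at all; Pre_ excludes exactly that input.
def Pre_even_fibonacci_seq (under : Option Int) : Prop := under ≠ none
instance (under : Option Int) : Decidable (Pre_even_fibonacci_seq under) := by
  unfold Pre_even_fibonacci_seq; infer_instance
def pvWitness_even_fibonacci_seq : Option Int := (some 100)

def Spec_even_fibonacci_seq (under : Option Int) (out : List Int) : Prop := out = even_fibonacci_seq_alt under
instance (under : Option Int) (out : List Int) : Decidable (Spec_even_fibonacci_seq under out) := by unfold Spec_even_fibonacci_seq; infer_instance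

-- ===== CLAIM (what is proved, stated in full; the proofs are below) =====
def Claim_equal_even_fibonacci_seq : Prop := ∀ (under : Option Int), Dom_even_fibonacci_seq under → Pre_even_fibonacci_seq under → Spec_even_fibonacci_seq under (even_fibonacci_seq under)

-- ===== LEMMAS AND PROOFS =====

-- aLoop does not depend on its proof arguments (proof irrelevance), so equal numeric
-- arguments give equal results.
theorem aLoop_congr (u f b f' b' : Int) (p1 : 0 ≤ f) (p2 : 0 < b) (q1 : 0 ≤ f') (q2 : 0 < b')
    (hf : f = f') (hb : b = b') : aLoop u f b p1 p2 = aLoop u f' b' q1 q2 := by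
  subst hf; subst hb; rfl

theorem bLoop_congr (u a b a' b' : Int) (p1 : 0 < a) (p2 : a ≤ b) (q1 : 0 < a') (q2 : a' ≤ b')
    (ha : a = a') (hb : b = b') : bLoop u a b p1 p2 = bLoop u a' b' q1 q2 := by
  subst ha; subst hb; rfl

-- Key bridge: B's loop from state (a, b) (b the last even Fibonacci, a its
-- predecessor) equals A's loop from (f, b) with f the previous even term, 2a = f + b.
theorem bLoop_eq_aLoop (u a b f : Int) (ha : 0 < a) (hab : a ≤ b) (hba : b ≤ 2 * a)
    (hpa : a % 2 = 1) (hpb : b % 2 = 0) (hf : 2 * a = f + b)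
    (hf0 : 0 ≤ f) (hb0 : 0 < b) :
    bLoop u a b ha hab = aLoop u f b hf0 hb0 := by
  rw [bLoop]; rw [dif_neg (by omega : ¬ (a + b) % 2 = 0)]
  rw [bLoop]; rw [dif_neg (by omega : ¬ (b + (a + b)) % 2 = 0)]
  rw [bLoop]; rw [dif_pos (by omega : ((a + b) + (b + (a + b))) % 2 = 0)]
  rw [aLoop]
  by_cases h : 4 * b + f < u
  · rw [dif_pos h, dif_neg (by omega : ¬ u ≤ (a + b) + (b + (a + b)))]
    congr 1
    · omega
    · rw [bLoop_eq_aLoop u (b + (a + b)) ((a + b) + (b + (a + b))) b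
        (by omega) (by omega) (by omega) (by omega) (by omega) (by omega) (by omega) (by omega)]
      exact aLoop_congr _ _ _ _ _ _ _ _ _ rfl (by omega)
  · rw [dif_neg h, dif_pos (by omega : u ≤ (a + b) + (b + (a + b)))]
termination_by (u - (4 * b + f)).toNat
decreasing_by omega

theorem aLoop02 (u : Int) (p : (0:Int) ≤ 0) (q : (0:Int) < 2) (p' : (0:Int) ≤ 2) (q' : (0:Int) < 8) :
    aLoop u 0 2 p q = if 8 < u then 8 :: aLoop u 2 8 p' q' else [] := by
  rw [aLoop]
  by_cases h8 : 8 < u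
  · rw [dif_pos (by omega : 4 * 2 + (0:Int) < u), if_pos h8]
    rfl
  · rw [dif_neg (by omega : ¬ 4 * 2 + (0:Int) < u), if_neg h8]

theorem even_fibonacci_seq_spec : Claim_equal_even_fibonacci_seq := by
  intro under _ hpre
  unfold Spec_even_fibonacci_seq
  match under with
  | none => exact absurd rfl hpre
  | some u =>
    show even_fibonacci_seq (some u) = even_fibonacci_seq_alt (some u)
    unfold even_fibonacci_seq even_fibonacci_seq_alt
    show ((if 2 < u then [2] else []) ++ (if 8 < u then [8] else []) ++
        aLoop u 2 8 (by norm_num) (by norm_num)) = bLoop u 1 1 one_pos le_rfl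
    rw [bLoop]; rw [dif_pos (by omega : ((1 : Int) + 1) % 2 = 0)]
    by_cases h2 : 2 < u
    · rw [dif_neg (by omega : ¬ u ≤ (1 : Int) + 1), if_pos h2]
      rw [bLoop_congr u 1 (1 + 1) 1 2 (by omega) (by omega) (by omega) (by omega) rfl (by norm_num)]
      rw [bLoop_eq_aLoop u 1 2 0 (by omega) (by omega) (by omega) (by omega) (by omega)
        (by omega) (by omega) (by omega)]
      rw [aLoop02 u _ _ (by omega) (by omega)]
      by_cases h8 : 8 < u
      · simp [h8]
      · rw [if_neg h8, if_neg h8]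
        rw [aLoop, dif_neg (by omega : ¬ 4 * 8 + (2 : Int) < u)]
        simp
    · rw [dif_pos (by omega : u ≤ (1 : Int) + 1), if_neg h2,
        if_neg (by omega : ¬ 8 < u)]
      rw [aLoop, dif_neg (by omega : ¬ 4 * 8 + (2 : Int) < u)]
      simp
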